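-- pv_equiv track=rewrite | github.com/MobinaShahbazi/SBMU_ETL | rabitpy/io/parsers.py | _set_order
-- ===== SOURCE A (Python) =====
-- def _set_order(md, fields):
--
--     last = {k: -1 for k in fields}
--     counter = {k: 0 for k in fields}
--
--     for rec in md:
--         for k, v in fields.items():
--             if last[k] == -1 or last[k] != rec[k]:
--                 counter[k] += 1
--                 last[k] = rec[k]
--
--             rec.update({v: counter[k]})
--
--     return md
-- ===== SOURCE B (Python) =====
-- def _set_order(md, fields):
--     for k, v in fields.items():
--         # Stage 1: run-length encode the column of field k: maximal blocks of
--         # equal values, except that a -1 never extends a block (each -1 is its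
--         # own run, matching the -1 sentinel semantics).
--         runs = []
--         for rec in md:
--             x = rec[k]
--             if runs and runs[-1][0] == x and x != -1:
--                 runs[-1][1] += 1
--             else:
--                 runs.append([x, 1])
--         # Stage 2: each run's 1-based index is the order number of its records.
--         i = 0
--         for n, run in enumerate(runs, 1):
--             for _ in range(run[1]):
--                 md[i][v] = n
--                 i += 1
--     return md
-- ===== Notes on version B (the rewrite author's own statement) =====
-- stated objective: alternative
-- what changed: A scans the records once maintaining per-field last/counter dicts; B instead, per field, run-length encodes the column into an explicit runs list (a -1 never extends a run) and then assigns each run's 1-based index to its records in a second expansion pass.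
import Mathlib
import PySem

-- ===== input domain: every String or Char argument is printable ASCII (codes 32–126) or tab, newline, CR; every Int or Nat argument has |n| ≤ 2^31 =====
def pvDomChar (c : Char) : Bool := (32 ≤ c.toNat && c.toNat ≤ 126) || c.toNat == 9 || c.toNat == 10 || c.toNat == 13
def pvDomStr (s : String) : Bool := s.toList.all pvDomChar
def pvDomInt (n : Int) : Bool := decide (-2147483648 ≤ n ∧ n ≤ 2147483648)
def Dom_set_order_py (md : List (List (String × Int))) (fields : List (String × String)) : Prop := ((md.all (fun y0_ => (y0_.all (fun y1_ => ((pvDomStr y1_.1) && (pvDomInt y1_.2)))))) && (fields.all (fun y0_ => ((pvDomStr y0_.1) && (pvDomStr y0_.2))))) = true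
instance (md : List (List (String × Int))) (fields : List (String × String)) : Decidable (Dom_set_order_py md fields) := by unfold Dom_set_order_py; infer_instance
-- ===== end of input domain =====

-- B replaces A's record-major scan with per-field run-length ENCODING of the column
-- followed by an expansion pass that assigns each run's 1-based index to its records
-- (objective: alternative algorithm, same cost; equivalence is about return values —
-- both Pythons mutate the record dicts of md in place in the same way).

-- ===== PORT A =====
-- A's inner body for one field (k, v) on state (rec-dict, last, counter):
-- 'if last[k] == -1 or last[k] != rec[k]: counter[k] += 1; last[k] = rec[k]' then 'rec[v] = counter[k]'
def aInner (s : PySem.Dict String Int × PySem.Dict String Int × PySem.Dict String Int)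
    (kv : String × String) :
    PySem.Dict String Int × PySem.Dict String Int × PySem.Dict String Int :=
  let x : Int := (s.1.get? kv.1).getD 0   -- rec[k]; the KeyError case (get? = none) is outside Pre_
  let lv : Int := s.2.1.getD kv.1 (-1)
  let lc : PySem.Dict String Int × PySem.Dict String Int :=
    if lv == -1 || lv != x then
      (s.2.1.insert kv.1 x, s.2.2.insert kv.1 (s.2.2.getD kv.1 0 + 1))
    else (s.2.1, s.2.2)
  (s.1.insert kv.2 (lc.2.getD kv.1 0), lc)

-- one iteration of A's outer 'for rec in md' loop (fs = fields.items())
def aRecStep (fs : List (String × String))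
    (st : List (List (String × Int)) × PySem.Dict String Int × PySem.Dict String Int)
    (rec : List (String × Int)) :
    List (List (String × Int)) × PySem.Dict String Int × PySem.Dict String Int :=
  let r := fs.foldl aInner (PySem.Dict.ofList rec, st.2.1, st.2.2)
  (st.1 ++ [r.1.items], r.2)

def set_order_py (md : List (List (String × Int))) (fields : List (String × String)) : List (List (String × Int)) :=
  let fd := PySem.Dict.ofList fields
  let last0 := PySem.Dict.ofList (fd.keys.map (fun k => (k, (-1 : Int))))      -- {k: -1 for k in fields}
  let counter0 := PySem.Dict.ofList (fd.keys.map (fun k => (k, (0 : Int))))    -- {k: 0 for k in fields}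
  (md.foldl (aRecStep fd.items) ([], last0, counter0)).1

-- ===== PORT B =====
-- Source B stage 1, one step: 'if runs and runs[-1][0] == x and x != -1: runs[-1][1] += 1 else: runs.append([x, 1])'
def rleStep (runs : List (Int × Nat)) (x : Int) : List (Int × Nat) :=
  match runs.getLast? with
  | some p => if p.1 == x && x != -1 then runs.dropLast ++ [(p.1, p.2 + 1)]
              else runs ++ [(x, 1)]
  | none => runs ++ [(x, 1)]

-- Source B stage 2: 'for n, run in enumerate(runs, 1): for _ in range(run[1]): md[i][v] = n; i += 1'
def writeRuns (v : String) (n : Int) : List (Int × Nat) → List (PySem.Dict String Int) → List (PySem.Dict String Int)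
  | [], L => L
  | r :: rest, L => (L.take r.2).map (fun d => d.insert v n) ++ writeRuns v (n + 1) rest (L.drop r.2)

-- one field's pass: read the column (rec[k]; KeyError outside Pre_), RLE it, expand
def bPass (k v : String) (md : List (List (String × Int))) : List (List (String × Int)) :=
  let col := md.map (fun rec => ((PySem.Dict.ofList rec).get? k).getD 0)
  let runs := col.foldl rleStep []
  (writeRuns v 1 runs (md.map PySem.Dict.ofList)).map PySem.Dict.items

def set_order_py_alt (md : List (List (String × Int))) (fields : List (String × String)) : List (List (String × Int)) :=
  (PySem.Dict.ofList fields).items.foldl (fun m kv => bPass kv.1 kv.2 m) md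

-- ===== PRECONDITION & SPEC =====
-- presOk ks fs: walking the fields pairs in dict order, each key k is already a key of the
-- record (initially ks, each processed pair's output name v becomes a key); exactly when this
-- fails does Python's rec[k] raise KeyError.
def presOk (ks : List String) (fs : List (String × String)) : Bool :=
  match fs with
  | [] => true
  | p :: rest => ks.contains p.1 && presOk (p.2 :: ks) rest

-- Pre_ excludes (a) records given as association lists with duplicate keys, which do not
-- represent a Python dict (both Pythons see the same collapsed dict there and agree), and
-- (b) inputs where some record lacks a needed field key, on which both A and B raise KeyError.
def Pre_set_order_py (md : List (List (String × Int))) (fields : List (String × String)) : Prop :=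
  ∀ rec ∈ md, (rec.map Prod.fst).Nodup ∧
    presOk (rec.map Prod.fst) (PySem.Dict.ofList fields).items = true
instance (md : List (List (String × Int))) (fields : List (String × String)) : Decidable (Pre_set_order_py md fields) := by unfold Pre_set_order_py; infer_instance

def pvWitness_set_order_py : (List (List (String × Int))) × (List (String × String)) :=
  ([[("a", 1)], [("a", 2)], [("a", 2)]], [("a", "o")])

def Spec_set_order_py (md : List (List (String × Int))) (fields : List (String × String)) (out : List (List (String × Int))) : Prop := out = set_order_py_alt md fields
instance (md : List (List (String × Int))) (fields : List (String × String)) (out : List (List (String × Int))) : Decidable (Spec_set_order_py md fields out) := by unfold Spec_set_order_py; infer_instance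

-- ===== CLAIM (what is proved, stated in full; the proofs are below) =====
def Claim_equal_set_order_py : Prop := ∀ (md : List (List (String × Int))) (fields : List (String × String)), Dom_set_order_py md fields → Pre_set_order_py md fields → Spec_set_order_py md fields (set_order_py md fields)

-- ===== LEMMAS AND PROOFS =====

-- dict-level version of A's loop, used only by the proofs
def aRun (fs : List (String × String)) (L : List (PySem.Dict String Int))
    (l c : PySem.Dict String Int) :
    List (PySem.Dict String Int) × PySem.Dict String Int × PySem.Dict String Int :=
  match L with
  | [] => ([], l, c)
  | rd :: L =>
      let r := fs.foldl aInner (rd, l, c)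
      let t := aRun fs L r.2.1 r.2.2
      (r.1 :: t.1, t.2)

-- proof-side scalar single-field scan (the intermediary between A and B)
def bRunStep (k v : String) (last cnt : Int) (rd : PySem.Dict String Int) :
    PySem.Dict String Int × Int × Int :=
  let x : Int := (rd.get? k).getD 0
  let p : Int × Int := if last == -1 || last != x then (x, cnt + 1) else (last, cnt)
  (rd.insert v p.2, p)

def bRun (k v : String) (last cnt : Int) (L : List (PySem.Dict String Int)) :
    List (PySem.Dict String Int) × Int × Int :=
  match L with
  | [] => ([], last, cnt)
  | rd :: L =>
      let r := bRunStep k v last cnt rd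
      let t := bRun k v r.2.1 r.2.2 L
      (r.1 :: t.1, t.2)

def bAll (fs : List (String × String)) (L : List (PySem.Dict String Int)) :
    List (PySem.Dict String Int) :=
  fs.foldl (fun L kv => (bRun kv.1 kv.2 (-1) 0 L).1) L

-- the order-number sequence of one column under A's scan
def goOrd (last cnt : Int) : List Int → List Int
  | [] => []
  | x :: t => if last == -1 || last != x then (cnt + 1) :: goOrd x (cnt + 1) t
              else cnt :: goOrd last cnt t

-- flattening of a runs list into per-record order numbers
def expandRuns (n : Int) : List (Int × Nat) → List Int
  | [] => []
  | r :: rest => List.replicate r.2 n ++ expandRuns (n + 1) rest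

lemma items_ofList_of_nodup (rec : List (String × Int)) (h : (rec.map Prod.fst).Nodup) :
    (PySem.Dict.ofList rec).items = rec := by
  have := PySem.Dict.items_foldl_insert_fresh rec Prod.fst Prod.snd PySem.Dict.empty (by simp) h
  simpa [PySem.Dict.ofList, PySem.Dict.update] using this

lemma ofList_items_of_nodup (d : PySem.Dict String Int) (h : d.keys.Nodup) :
    PySem.Dict.ofList d.items = d := by
  apply PySem.Dict.ext
  exact items_ofList_of_nodup d.items h

lemma foldlA (fs : List (String × String)) (md : List (List (String × Int)))
    (acc : List (List (String × Int))) (l c : PySem.Dict String Int) :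
    (md.foldl (aRecStep fs) (acc, l, c)).1
      = acc ++ ((aRun fs (md.map PySem.Dict.ofList) l c).1.map PySem.Dict.items) := by
  induction md generalizing acc l c with
  | nil => simp [aRun]
  | cons rec tl ih =>
      simp only [List.foldl_cons, List.map_cons, aRun, aRecStep]
      rw [ih]
      simp

-- scalar scan = zip with the order sequence
lemma bRun_eq_zip (k v : String) (last cnt : Int) (L : List (PySem.Dict String Int)) :
    (bRun k v last cnt L).1
      = (L.zip (goOrd last cnt (L.map (fun d => (d.get? k).getD 0)))).map
          (fun p => p.1.insert v p.2) := by
  induction L generalizing last cnt with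
  | nil => simp [bRun]
  | cons rd tl ih =>
      simp only [bRun, bRunStep, List.map_cons, goOrd]
      split_ifs with hc
      · simp [List.zip_cons_cons, ih]
      · simp [List.zip_cons_cons, ih]

lemma goOrd_length (last cnt : Int) (col : List Int) :
    (goOrd last cnt col).length = col.length := by
  induction col generalizing last cnt with
  | nil => rfl
  | cons x t ih => simp only [goOrd]; split_ifs <;> simp [ih]

lemma zip_replicate_map (v : String) (c : Int) (M : List (PySem.Dict String Int)) :
    ∀ j, M.length ≤ j →
      (M.zip (List.replicate j c)).map (fun p => p.1.insert v p.2)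
        = M.map (fun d => d.insert v c) := by
  induction M with
  | nil => simp
  | cons d t ih =>
      intro j hj
      cases j with
      | zero => simp at hj
      | succ j =>
          simp only [List.replicate_succ, List.zip_cons_cons, List.map_cons]
          rw [ih j (by simpa using hj)]

-- expansion of a runs list = zip with the flattened order numbers
lemma writeRuns_eq_zip (v : String) :
    ∀ (runs : List (Int × Nat)) (n : Int) (L : List (PySem.Dict String Int)),
      L.length = (expandRuns n runs).length →
      writeRuns v n runs L
        = (L.zip (expandRuns n runs)).map (fun p => p.1.insert v p.2) := by
  intro runs
  induction runs with
  | nil =>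
      intro n L h
      simp only [expandRuns, List.length_nil] at h
      rw [List.length_eq_zero_iff] at h
      simp [writeRuns, h, expandRuns]
  | cons r rest ih =>
      intro n L h
      simp only [expandRuns, List.length_append, List.length_replicate] at h
      have hr : r.2 ≤ L.length := by omega
      have hs : L = L.take r.2 ++ L.drop r.2 := (List.take_append_drop _ _).symm
      conv_lhs => rw [writeRuns]
      conv_rhs => rw [hs]
      rw [expandRuns, List.zip_append (by simp [hr]), List.map_append]
      congr 1
      · exact (zip_replicate_map v n (L.take r.2) r.2 (by simp)).symm
      · exact ih (n + 1) (L.drop r.2) (by simp; omega)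

lemma expandRuns_append (rs rs2 : List (Int × Nat)) (n : Int) :
    expandRuns n (rs ++ rs2) = expandRuns n rs ++ expandRuns (n + rs.length) rs2 := by
  induction rs generalizing n with
  | nil => simp [expandRuns]
  | cons r t ih =>
      simp only [List.cons_append, expandRuns, ih, List.append_assoc, List.length_cons]
      congr 3
      push_cast
      ring

-- core of the B-direction: the RLE fold expands to A's scan order sequence
lemma rle_expand (col : List Int) :
    ∀ (rs : List (Int × Nat)) (x : Int) (j : Nat) (n : Int),
      expandRuns n (col.foldl rleStep (rs ++ [(x, j)]))
        = expandRuns n rs ++ List.replicate j (n + rs.length)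
            ++ goOrd x (n + rs.length) col := by
  induction col with
  | nil =>
      intro rs x j n
      simp [expandRuns_append, expandRuns, goOrd]
  | cons y t ih =>
      intro rs x j n
      by_cases hxy : x = y
      · by_cases hy1 : y = -1
        · -- new run: x = y = -1 so the scan's 'last == -1' fires
          have hstep : rleStep (rs ++ [(x, j)]) y = (rs ++ [(x, j)]) ++ [(y, 1)] := by
            simp [rleStep, hxy, hy1]
          simp only [List.foldl_cons, hstep]
          rw [ih (rs ++ [(x, j)]) y 1 n]
          have hg : goOrd x (n + rs.length) (y :: t)
              = (n + rs.length + 1) :: goOrd y (n + rs.length + 1) t := by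
            rw [goOrd]
            simp [hxy, hy1]
          rw [hg, expandRuns_append]
          simp [expandRuns, List.append_assoc]
          constructor <;> · ring_nf
        · -- extend the run: scan does not increment
          have hstep : rleStep (rs ++ [(x, j)]) y = rs ++ [(x, j + 1)] := by
            simp [rleStep, hxy, hy1]
          simp only [List.foldl_cons, hstep]
          rw [ih rs x (j + 1) n]
          have hg : goOrd x (n + rs.length) (y :: t)
              = (n + rs.length) :: goOrd x (n + rs.length) t := by
            rw [goOrd]
            subst hxy
            simp [hy1]
          rw [hg, List.replicate_succ']
          simp [List.append_assoc]
      · -- new run: values differ so the scan increments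
        have hstep : rleStep (rs ++ [(x, j)]) y = (rs ++ [(x, j)]) ++ [(y, 1)] := by
          simp [rleStep, hxy]
        simp only [List.foldl_cons, hstep]
        rw [ih (rs ++ [(x, j)]) y 1 n]
        have hg : goOrd x (n + rs.length) (y :: t)
            = (n + rs.length + 1) :: goOrd y (n + rs.length + 1) t := by
          rw [goOrd]
          simp [hxy]
        rw [hg, expandRuns_append]
        simp [expandRuns, List.append_assoc]
        constructor <;> · ring_nf

lemma rle_expand_top (col : List Int) :
    expandRuns 1 (col.foldl rleStep []) = goOrd (-1) 0 col := by
  cases col with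
  | nil => rfl
  | cons y t =>
      have h0 : rleStep [] y = [(y, 1)] := by simp [rleStep]
      simp only [List.foldl_cons, h0]
      have h := rle_expand t [] y 1 1
      rw [List.nil_append] at h
      rw [h, goOrd]
      simp [expandRuns]

-- per-field: B's RLE pass = the scalar scan, on dict lists
lemma passEq (k v : String) (L : List (PySem.Dict String Int)) :
    writeRuns v 1 ((L.map (fun d => (d.get? k).getD 0)).foldl rleStep []) L
      = (bRun k v (-1) 0 L).1 := by
  rw [bRun_eq_zip]
  rw [writeRuns_eq_zip v _ 1 L (by rw [rle_expand_top, goOrd_length]; simp)]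
  rw [rle_expand_top]

lemma bRun_nodup (k v : String) (last cnt : Int) (L : List (PySem.Dict String Int))
    (h : ∀ d ∈ L, d.keys.Nodup) :
    ∀ d ∈ (bRun k v last cnt L).1, d.keys.Nodup := by
  induction L generalizing last cnt with
  | nil => simp [bRun]
  | cons rd tl ih =>
      intro d hd
      simp only [bRun, bRunStep, List.mem_cons] at hd
      rcases hd with hh | hh
      · subst hh
        exact PySem.Dict.nodup_keys_insert _ _ _ (h rd List.mem_cons_self)
      · exact ih _ _ (fun d hd => h d (List.mem_cons_of_mem _ hd)) d hh

lemma altGlue (fs : List (String × String)) (L : List (PySem.Dict String Int))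
    (h : ∀ d ∈ L, d.keys.Nodup) :
    fs.foldl (fun m kv => bPass kv.1 kv.2 m) (L.map PySem.Dict.items)
      = (bAll fs L).map PySem.Dict.items := by
  induction fs generalizing L with
  | nil => simp [bAll]
  | cons kv fs' ih =>
      have hL : (L.map PySem.Dict.items).map PySem.Dict.ofList = L := by
        rw [List.map_map]
        conv_rhs => rw [← List.map_id L]
        exact List.map_congr_left (fun d hd => ofList_items_of_nodup d (h d hd))
      have hcol : (L.map PySem.Dict.items).map
            (fun rec => ((PySem.Dict.ofList rec).get? kv.1).getD 0)
          = L.map (fun d => (d.get? kv.1).getD 0) := by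
        rw [List.map_map]
        exact List.map_congr_left (fun d hd => by
          simp [ofList_items_of_nodup d (h d hd)])
      have hb : bPass kv.1 kv.2 (L.map PySem.Dict.items)
          = ((bRun kv.1 kv.2 (-1) 0 L).1).map PySem.Dict.items := by
        rw [bPass]
        simp only [hcol, hL]
        rw [passEq]
      simp only [List.foldl_cons, bAll, hb]
      exact ih _ (bRun_nodup _ _ _ _ _ h)

-- aInner touches last/counter only at key kv.1
lemma preserveA (fs : List (String × String)) (k : String) (hk : k ∉ fs.map Prod.fst) :
    ∀ (rd l c : PySem.Dict String Int),
      (fs.foldl aInner (rd, l, c)).2.1.getD k (-1) = l.getD k (-1)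
      ∧ (fs.foldl aInner (rd, l, c)).2.2.getD k 0 = c.getD k 0 := by
  induction fs with
  | nil => simp
  | cons kv rest ih =>
      simp only [List.map_cons, List.mem_cons, not_or] at hk
      intro rd l c
      simp only [List.foldl_cons]
      rcases ih hk.2 (aInner (rd, l, c) kv).1 (aInner (rd, l, c) kv).2.1
        (aInner (rd, l, c) kv).2.2 with ⟨h1, h2⟩
      constructor
      · rw [h1]
        simp only [aInner]
        split_ifs with hc
        · simp [PySem.Dict.getD_insert, hk.1]
        · rfl
      · rw [h2]
        simp only [aInner]
        split_ifs with hc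
        · simp [PySem.Dict.getD_insert, hk.1]
        · rfl

-- congruence: the fields fold only reads last/counter at keys of fs
lemma congA (fs : List (String × String)) (k : String) (hk : k ∉ fs.map Prod.fst) :
    ∀ (s s' : PySem.Dict String Int × PySem.Dict String Int × PySem.Dict String Int),
      s.1 = s'.1 →
      (∀ q, q ≠ k → s.2.1.getD q (-1) = s'.2.1.getD q (-1) ∧ s.2.2.getD q 0 = s'.2.2.getD q 0) →
      (fs.foldl aInner s).1 = (fs.foldl aInner s').1
      ∧ (∀ q, q ≠ k →
          (fs.foldl aInner s).2.1.getD q (-1) = (fs.foldl aInner s').2.1.getD q (-1)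
          ∧ (fs.foldl aInner s).2.2.getD q 0 = (fs.foldl aInner s').2.2.getD q 0) := by
  induction fs with
  | nil => exact fun s s' h1 hag => ⟨h1, hag⟩
  | cons kv rest ih =>
      simp only [List.map_cons, List.mem_cons, not_or] at hk
      intro s s' h1 hag
      have hne : kv.1 ≠ k := fun e => hk.1 e.symm
      have hcl := (hag kv.1 hne).1
      have hcc := (hag kv.1 hne).2
      have hstep : (aInner s kv).1 = (aInner s' kv).1
          ∧ (∀ q, q ≠ k →
              (aInner s kv).2.1.getD q (-1) = (aInner s' kv).2.1.getD q (-1)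
              ∧ (aInner s kv).2.2.getD q 0 = (aInner s' kv).2.2.getD q 0) := by
        simp only [aInner, h1, hcl, hcc]
        split_ifs with hc
        · refine ⟨by simp [PySem.Dict.getD_insert_self], fun q hq => ?_⟩
          simp only [PySem.Dict.getD_insert]
          split_ifs with h2
          · exact ⟨rfl, rfl⟩
          · exact hag q hq
        · exact ⟨by simp [hcc], fun q hq => hag q hq⟩
      simp only [List.foldl_cons]
      exact ih hk.2 _ _ hstep.1 hstep.2

lemma congRunA (fs : List (String × String)) (k : String) (hk : k ∉ fs.map Prod.fst) :
    ∀ (M : List (PySem.Dict String Int)) (l c l' c' : PySem.Dict String Int),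
      (∀ q, q ≠ k → l.getD q (-1) = l'.getD q (-1) ∧ c.getD q 0 = c'.getD q 0) →
      (aRun fs M l c).1 = (aRun fs M l' c').1 := by
  intro M
  induction M with
  | nil => intros; rfl
  | cons rd tl ih =>
      intro l c l' c' hag
      have hs := congA fs k hk (rd, l, c) (rd, l', c') rfl hag
      simp only [aRun]
      rw [ih _ _ _ _ hs.2, hs.1]

-- peel the first field: interleaved processing = one scalar pass for it, then the rest
lemma peel (k v : String) (fs : List (String × String)) (hk : k ∉ fs.map Prod.fst) :
    ∀ (L : List (PySem.Dict String Int)) (l c : PySem.Dict String Int),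
      (aRun ((k, v) :: fs) L l c).1
        = (aRun fs ((bRun k v (l.getD k (-1)) (c.getD k 0) L).1) l c).1 := by
  intro L
  induction L with
  | nil => intro l c; simp [aRun, bRun]
  | cons rd tl ih =>
      intro l c
      have hF : (aInner (rd, l, c) (k, v)).1 = (bRunStep k v (l.getD k (-1)) (c.getD k 0) rd).1
          ∧ (aInner (rd, l, c) (k, v)).2.1.getD k (-1) = (bRunStep k v (l.getD k (-1)) (c.getD k 0) rd).2.1
          ∧ (aInner (rd, l, c) (k, v)).2.2.getD k 0 = (bRunStep k v (l.getD k (-1)) (c.getD k 0) rd).2.2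
          ∧ (∀ q, q ≠ k →
              (aInner (rd, l, c) (k, v)).2.1.getD q (-1) = l.getD q (-1)
              ∧ (aInner (rd, l, c) (k, v)).2.2.getD q 0 = c.getD q 0) := by
        simp only [aInner, bRunStep]
        split_ifs with hc
        · refine ⟨by simp [PySem.Dict.getD_insert_self], by simp [PySem.Dict.getD_insert_self],
            by simp [PySem.Dict.getD_insert_self], fun q hq => ?_⟩
          constructor <;> · rw [PySem.Dict.getD_insert]; simp [hq]
        · exact ⟨rfl, rfl, rfl, fun q hq => ⟨rfl, rfl⟩⟩
      have hcong := congA fs k hk (aInner (rd, l, c) (k, v))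
        ((bRunStep k v (l.getD k (-1)) (c.getD k 0) rd).1, l, c)
        hF.1 (fun q hq => hF.2.2.2 q hq)
      have hpres := preserveA fs k hk (aInner (rd, l, c) (k, v)).1
        (aInner (rd, l, c) (k, v)).2.1 (aInner (rd, l, c) (k, v)).2.2
      have e1 : (fs.foldl aInner (aInner (rd, l, c) (k, v))).2.1.getD k (-1)
          = (bRunStep k v (l.getD k (-1)) (c.getD k 0) rd).2.1 := hpres.1.trans hF.2.1
      have e2 : (fs.foldl aInner (aInner (rd, l, c) (k, v))).2.2.getD k 0
          = (bRunStep k v (l.getD k (-1)) (c.getD k 0) rd).2.2 := hpres.2.trans hF.2.2.1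
      have lhs_eq : (aRun ((k, v) :: fs) (rd :: tl) l c).1
          = (fs.foldl aInner (aInner (rd, l, c) (k, v))).1
            :: (aRun ((k, v) :: fs) tl
                  (fs.foldl aInner (aInner (rd, l, c) (k, v))).2.1
                  (fs.foldl aInner (aInner (rd, l, c) (k, v))).2.2).1 := rfl
      have rhs_eq : (aRun fs ((bRun k v (l.getD k (-1)) (c.getD k 0) (rd :: tl)).1) l c).1
          = (fs.foldl aInner ((bRunStep k v (l.getD k (-1)) (c.getD k 0) rd).1, l, c)).1
            :: (aRun fs
                  ((bRun k v (bRunStep k v (l.getD k (-1)) (c.getD k 0) rd).2.1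
                      (bRunStep k v (l.getD k (-1)) (c.getD k 0) rd).2.2 tl).1)
                  (fs.foldl aInner ((bRunStep k v (l.getD k (-1)) (c.getD k 0) rd).1, l, c)).2.1
                  (fs.foldl aInner ((bRunStep k v (l.getD k (-1)) (c.getD k 0) rd).1, l, c)).2.2).1 := rfl
      rw [lhs_eq, rhs_eq]
      congr 1
      · exact hcong.1
      · rw [ih]
        rw [e1, e2]
        exact congRunA fs k hk _ _ _ _ _ hcong.2

lemma main_interchange (fs : List (String × String)) (hnd : (fs.map Prod.fst).Nodup) :
    ∀ (L : List (PySem.Dict String Int)) (l c : PySem.Dict String Int),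
      (∀ p ∈ fs, l.getD p.1 (-1) = -1 ∧ c.getD p.1 0 = 0) →
      (aRun fs L l c).1 = bAll fs L := by
  induction fs with
  | nil =>
      intro L l c _
      induction L with
      | nil => rfl
      | cons rd tl ihL => simpa [aRun, bAll] using ihL
  | cons kv fs' ih =>
      intro L l c hinit
      simp only [List.map_cons, List.nodup_cons] at hnd
      have hk : kv.1 ∉ fs'.map Prod.fst := hnd.1
      have h0 := hinit kv List.mem_cons_self
      have hpeel := peel kv.1 kv.2 fs' hk L l c
      rw [show ((kv.1, kv.2) : String × String) = kv from rfl] at hpeel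
      rw [hpeel, h0.1, h0.2]
      rw [ih hnd.2 _ l c (fun p hp => hinit p (List.mem_cons_of_mem _ hp))]
      rfl

lemma getD_const_init (ks : List String) (z : Int) (q : String) :
    (PySem.Dict.ofList (ks.map (fun k => (k, z)))).getD q z = z := by
  suffices h : ∀ (ks : List String) (d : PySem.Dict String Int), (∀ q, d.getD q z = z) →
      ∀ q, ((ks.map (fun k => (k, z))).foldl (fun acc p => acc.insert p.1 p.2) d).getD q z = z by
    exact h ks PySem.Dict.empty (fun q => by simp) q
  intro ks
  induction ks with
  | nil => intro d hd q; exact hd q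
  | cons a tl ih =>
      intro d hd q
      simp only [List.map_cons, List.foldl_cons]
      apply ih
      intro q2
      rw [PySem.Dict.getD_insert]
      split_ifs with h
      · rfl
      · exact hd q2

-- ===== VERDICT (by name: the statement is the Claim_ definition above) =====
theorem set_order_py_spec : Claim_equal_set_order_py := by
  intro md fields _ hpre
  unfold Spec_set_order_py
  simp only [set_order_py, set_order_py_alt]
  rw [foldlA, List.nil_append]
  have hmd : (md.map PySem.Dict.ofList).map PySem.Dict.items = md := by
    rw [List.map_map]
    conv_rhs => rw [← List.map_id md]
    exact List.map_congr_left (fun rec hrec => items_ofList_of_nodup rec ((hpre rec hrec).1))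
  conv_rhs => rw [← hmd]
  rw [altGlue _ _ (fun d hd => by
    rcases List.mem_map.1 hd with ⟨rec, _, hrec⟩
    exact hrec ▸ PySem.Dict.nodup_keys_ofList rec)]
  have hnd : ((PySem.Dict.ofList fields).items.map Prod.fst).Nodup := by
    have := PySem.Dict.nodup_keys_ofList (κ := String) (ν := String) fields
    simpa [PySem.Dict.keys] using this
  rw [main_interchange _ hnd _ _ _ (fun p _ => ⟨getD_const_init _ _ _, getD_const_init _ _ _⟩)]
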